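-- pv_equiv track=rewrite | github.com/nathaliaesper/app-actigraphy-test | src/actigraphy/components/graph.py | _find_continuous_blocks
-- ===== SOURCE A (Python) =====
-- from collections.abc import Sequence
--
-- def _find_continuous_blocks(vector: Sequence[bool]) -> list[int]:
--     """Finds the indices of continuous blocks of True values in a vector.
--
--     Args:
--         vector: The vector to search.
--
--     Returns:
--         list[int]: A list of indices of continuous blocks of True values in the
--             vector.
--     """
--     return [
--         index
--         for index, value in enumerate(vector)
--         if value
--         and (
--             index == 0
--             or index == len(vector) - 1
--             or not vector[index - 1]
--             or not vector[index + 1]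
--         )
--     ]
-- ===== SOURCE B (Python) =====
-- def _find_continuous_blocks(vector):
--     """Single state-machine pass: record run start on False->True, run end on True->False/end."""
--     out = []
--     start = None
--     i = 0
--     for v in vector:
--         if v:
--             if start is None:
--                 start = i
--         else:
--             if start is not None:
--                 out.append(start)
--                 if i - 1 != start:
--                     out.append(i - 1)
--                 start = None
--         i += 1
--     if start is not None:
--         out.append(start)
--         if i - 1 != start:
--             out.append(i - 1)
--     return out
-- ===== Notes on version B (the rewrite author's own statement) =====
-- stated objective: simpler
-- what changed: Replaced the comprehension that re-tests each index's neighbours (vector[index-1]/vector[index+1]) with a single state-machine pass that tracks the current True-run's start and appends the run's start/end indices at run boundaries.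
import Mathlib
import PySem

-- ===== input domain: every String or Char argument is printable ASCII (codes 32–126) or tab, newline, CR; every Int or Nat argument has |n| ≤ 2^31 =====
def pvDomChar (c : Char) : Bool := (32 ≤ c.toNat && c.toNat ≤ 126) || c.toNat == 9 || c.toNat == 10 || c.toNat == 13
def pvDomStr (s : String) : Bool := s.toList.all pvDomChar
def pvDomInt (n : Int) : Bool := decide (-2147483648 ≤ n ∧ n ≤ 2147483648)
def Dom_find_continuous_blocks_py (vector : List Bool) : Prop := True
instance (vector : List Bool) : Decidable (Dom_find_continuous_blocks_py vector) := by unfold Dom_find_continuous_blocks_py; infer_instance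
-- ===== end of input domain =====

-- B replaces A's per-index neighbour tests with one state-machine pass tracking the current
-- True-run's start (objective: simpler single pass, no neighbour indexing).

-- ===== PORT A =====
-- A is one comprehension over enumerate(vector): keep index if value is True and it is at a
-- vector edge or has a False neighbour.  vector[index-1] / vector[index+1] are only reached
-- (by `or` short-circuit) when in range, so the total pyGetD with default `false` is exact.
def find_continuous_blocks_py (vector : List Bool) : List Int :=
  ((PySem.List.enumerate vector 0).filter (fun p =>
      p.2 && (decide (p.1 = 0) || decide (p.1 = (vector.length : Int) - 1)
        || !(PySem.List.pyGetD vector (p.1 - 1) false)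
        || !(PySem.List.pyGetD vector (p.1 + 1) false)))).map (·.1)

-- ===== PORT B =====
-- B-side helper: the loop of Source B; `start` is the pending run-start (Python's `start`),
-- `out` the accumulator; the trailing `start is not None` block is the [] case.
def fcbAltGo : List Bool → Int → Option Int → List Int → List Int
  | [], i, start, out =>
    match start with
    | none => out
    | some s => if i - 1 = s then out ++ [s] else out ++ [s, i - 1]
  | true :: rest, i, start, out =>            -- `if v:` branch
    match start with
    | none => fcbAltGo rest (i + 1) (some i) out
    | some s => fcbAltGo rest (i + 1) (some s) out
  | false :: rest, i, start, out =>           -- `else` branch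
    match start with
    | none => fcbAltGo rest (i + 1) none out
    | some s => fcbAltGo rest (i + 1) none
        (if i - 1 = s then out ++ [s] else out ++ [s, i - 1])

def find_continuous_blocks_py_alt (vector : List Bool) : List Int :=
  fcbAltGo vector 0 none []

-- ===== PRECONDITION & SPEC =====
def Spec_find_continuous_blocks_py (vector : List Bool) (out : List Int) : Prop := out = find_continuous_blocks_py_alt vector
instance (vector : List Bool) (out : List Int) : Decidable (Spec_find_continuous_blocks_py vector out) := by unfold Spec_find_continuous_blocks_py; infer_instance

-- ===== CLAIM (what is proved, stated in full; the proofs are below) =====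
def Claim_equal_find_continuous_blocks_py : Prop := ∀ (vector : List Bool), Dom_find_continuous_blocks_py vector → Spec_find_continuous_blocks_py vector (find_continuous_blocks_py vector)

-- ===== LEMMAS AND PROOFS =====

-- Common reference scan: at index i, `inTrue` says the previous element exists and is True;
-- an index is kept iff its value is True and (it starts a run or the next element is absent/False).
def fcbScan : Int → Bool → List Bool → List Int
  | _, _, [] => []
  | i, inTrue, v :: rest =>
    (if v && (!inTrue || !(rest.headD false)) then [i] else []) ++ fcbScan (i + 1) v rest

lemma fcbAltGo_spec (t : List Bool) :
    (∀ i out, fcbAltGo t i none out = out ++ fcbScan i false t) ∧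
    (∀ i s out, s < i → fcbAltGo t i (some s) out =
      out ++ (if t.headD false then [s] else if i - 1 = s then [s] else [s, i - 1])
          ++ fcbScan i true t) := by
  induction t with
  | nil =>
    refine ⟨fun i out => by simp [fcbAltGo, fcbScan], fun i s out hs => ?_⟩
    by_cases h : i - 1 = s <;> simp [fcbAltGo, fcbScan, h]
  | cons v rest ih =>
    obtain ⟨ihn, ihs⟩ := ih
    constructor
    · intro i out
      cases v with
      | true =>
        simp only [fcbAltGo]
        rw [ihs (i + 1) i out (by omega)]
        have h1 : i + 1 - 1 = i := by omega
        match rest with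
        | [] => simp [fcbScan, h1]
        | true :: rs => simp [fcbScan, h1]
        | false :: rs => simp [fcbScan, h1]
      | false =>
        simp only [fcbAltGo]
        rw [ihn]
        simp [fcbScan]
    · intro i s out hs
      cases v with
      | true =>
        simp only [fcbAltGo]
        rw [ihs (i + 1) s out (by omega)]
        have h1 : i + 1 - 1 = i := by omega
        have hne : i ≠ s := by omega
        match rest with
        | [] => simp [fcbScan, h1, hne]
        | true :: rs => simp [fcbScan, h1, hne]
        | false :: rs => simp [fcbScan, h1, hne]
      | false =>
        simp only [fcbAltGo]
        rw [ihn]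
        by_cases h : i - 1 = s <;>
          · match rest with
            | [] => simp [fcbScan, h]
            | true :: rs => simp [fcbScan, h]
            | false :: rs => simp [fcbScan, h]

-- The predicate A filters with, abbreviated.
def fcbCondA (vec : List Bool) (i : Int) (v : Bool) : Bool :=
  v && (decide (i = 0) || decide (i = (vec.length : Int) - 1)
    || !(PySem.List.pyGetD vec (i - 1) false)
    || !(PySem.List.pyGetD vec (i + 1) false))

lemma fcbCondA_eq (pre : List Bool) (v : Bool) (rest : List Bool) :
    fcbCondA (pre ++ v :: rest) (pre.length : Int) v
      = (v && (!(pre.getLastD false) || !(rest.headD false))) := by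
  unfold fcbCondA
  cases v with
  | false => simp
  | true =>
    simp only [Bool.true_and]
    rcases List.eq_nil_or_concat pre with hpre | ⟨q, x, hpre⟩
    · subst hpre
      cases rest with
      | nil => simp
      | cons w rs => simp
    · subst hpre
      simp only [List.concat_eq_append]
      have hprev : PySem.List.pyGetD ((q ++ [x]) ++ true :: rest)
          (((q ++ [x]).length : Int) - 1) false = x := by
        have hm1 : (((q ++ [x]).length : Int)) - 1 = ((q.length : Nat) : Int) := by simp
        rw [hm1, PySem.List.pyGetD_natCast, List.append_assoc,
          List.getD_eq_getElem?_getD, List.getElem?_append_right (Nat.le_refl _)]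
        simp
      have hlast : (q ++ [x]).getLastD false = x := by simp
      cases rest with
      | nil =>
        have h2 : ((q ++ [x]).length : Int) = (((q ++ [x]) ++ [true]).length : Int) - 1 := by
          simp only [List.length_append, List.length_cons, List.length_nil]
          push_cast; omega
        rw [hlast, ← h2]
        simp
      | cons w rs =>
        have hnext : PySem.List.pyGetD ((q ++ [x]) ++ true :: w :: rs)
            (((q ++ [x]).length : Int) + 1) false = w := by
          have hp1 : ((q ++ [x]).length : Int) + 1 = ((q.length + 2 : Nat) : Int) := by
            simp only [List.length_append, List.length_cons, List.length_nil]
            push_cast; omega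
          rw [hp1, PySem.List.pyGetD_natCast,
            List.getD_eq_getElem?_getD, List.getElem?_append_right (by simp)]
          have h3 : q.length + 2 - (q ++ [x]).length = 1 := by simp
          rw [h3]
          rfl
        have hne0 : ¬ (((q ++ [x]).length : Int) = 0) := by
          simp only [List.length_append, List.length_cons, List.length_nil]
          push_cast; omega
        have hneL : ¬ (((q ++ [x]).length : Int)
            = (((q ++ [x]) ++ true :: w :: rs).length : Int) - 1) := by
          simp only [List.length_append, List.length_cons, List.length_nil]
          push_cast
          omega
        rw [hprev, hnext, hlast, decide_eq_false hne0, decide_eq_false hneL,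
          Bool.false_or, Bool.false_or]
        rfl

lemma fcbPortA_scan (t : List Bool) : ∀ (pre : List Bool),
    ((PySem.List.enumerate t (pre.length : Int)).filter
        (fun p => fcbCondA (pre ++ t) p.1 p.2)).map (·.1)
      = fcbScan (pre.length : Int) (pre.getLastD false) t := by
  induction t with
  | nil => intro pre; simp [PySem.List.enumerate_nil, fcbScan]
  | cons v rest ih =>
    intro pre
    have hih := ih (pre ++ [v])
    simp only [List.length_append, List.length_cons, List.length_nil, Nat.cast_add,
      Nat.cast_one, List.append_assoc, List.cons_append, List.nil_append,
      List.getLastD_concat] at hih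
    norm_num at hih
    rw [PySem.List.enumerate_cons, List.filter_cons]
    simp only [fcbCondA_eq]
    cases hk : (v && (!(pre.getLastD false) || !(rest.headD false))) with
    | true => simp at hk; rw [hk.1] at hih; simp [fcbScan, hih, hk]
    | false => simp at hk; simp [fcbScan, hih]; exact hk

-- ===== VERDICT (by name: the statement is the Claim_ definition above) =====
theorem find_continuous_blocks_py_spec : Claim_equal_find_continuous_blocks_py := by
  intro vector _
  unfold Spec_find_continuous_blocks_py
  unfold find_continuous_blocks_py find_continuous_blocks_py_alt
  have hA := fcbPortA_scan vector []
  simp only [List.length_nil, Int.natCast_zero, List.nil_append, List.getLastD] at hA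
  have hB := (fcbAltGo_spec vector).1 0 []
  simp only [List.nil_append] at hB
  rw [hB, ← hA]
  rfl
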